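-- pv_equiv track=rewrite | github.com/Ranketh2004/Neuro-Heaven | frontend/utils/asm_predictor.py | _pretty_feature_name
-- ===== SOURCE A (Python) =====
-- FRIENDLY_NAMES = {
--     "age": "Current age",
--     "age_of_onset": "Age at seizure onset",
--     "duration_since_onset": "Duration since onset",
--     "pretreatment_seizure_count": "Pre-treatment seizure count",
--     "seizure_burden_log": "Overall seizure burden (log)",
--     "seizure_frequency_risk": "Seizure frequency relative to age",
--     "prior_asm_exposure_count": "Number of prior ASMs tried",
--     "high_prior_asm": "More than one prior ASM",
--     "poly_asm_history": "Three or more prior ASMs",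
--     "structural_lesion_flag": "Structural lesion on MRI",
--     "mri_lesion_type": "MRI lesion type",
--     "eeg_epileptic_flag": "Epileptiform EEG activity",
--     "eeg_status_detail": "EEG status",
--     "comorbidity_burden": "Comorbidity burden",
--     "clinical_risk_index": "Clinical risk index (engineered)",
--     "sex": "Biological sex",
--     "seizure_type": "Seizure type",
--     "current_asm": "Current ASM",
-- }
--
-- def _pretty_feature_name(name: str) -> str:
--     """
--     Turns model feature names into readable labels.
--     Handles:
--       - prefixes like num__/cat__
--       - one-hot like mri_lesion_type_hippocampal_sclerosis
--       - base keys that contain underscores (age_of_onset)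
--     """
--     s = str(name)
--
--     for prefix in ("num__", "cat__", "remainder__"):
--         if s.startswith(prefix):
--             s = s[len(prefix):]
--
--     keys_sorted = sorted(FRIENDLY_NAMES.keys(), key=len, reverse=True)
--     for base in keys_sorted:
--         if s == base:
--             return FRIENDLY_NAMES.get(base, base)
--         if s.startswith(base + "_"):
--             rest = s[len(base) + 1:]
--             base_name = FRIENDLY_NAMES.get(base, base.replace("_", " ").title())
--             return f"{base_name}: {rest.replace('_', ' ').title()}"
--
--     return s.replace("_", " ").strip().title()
-- ===== SOURCE B (Python) =====
-- FRIENDLY_NAMES = {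
--     "age": "Current age",
--     "age_of_onset": "Age at seizure onset",
--     "duration_since_onset": "Duration since onset",
--     "pretreatment_seizure_count": "Pre-treatment seizure count",
--     "seizure_burden_log": "Overall seizure burden (log)",
--     "seizure_frequency_risk": "Seizure frequency relative to age",
--     "prior_asm_exposure_count": "Number of prior ASMs tried",
--     "high_prior_asm": "More than one prior ASM",
--     "poly_asm_history": "Three or more prior ASMs",
--     "structural_lesion_flag": "Structural lesion on MRI",
--     "mri_lesion_type": "MRI lesion type",
--     "eeg_epileptic_flag": "Epileptiform EEG activity",
--     "eeg_status_detail": "EEG status",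
--     "comorbidity_burden": "Comorbidity burden",
--     "clinical_risk_index": "Clinical risk index (engineered)",
--     "sex": "Biological sex",
--     "seizure_type": "Seizure type",
--     "current_asm": "Current ASM",
-- }
--
-- def _pretty_feature_name(name: str) -> str:
--     s = str(name)
--     for prefix in ("num__", "cat__", "remainder__"):
--         if s.startswith(prefix):
--             s = s[len(prefix):]
--     # single pass over the dict, keeping the longest matching base key (no sort)
--     best = None
--     for base in FRIENDLY_NAMES:
--         if (s == base or s.startswith(base + "_")) and (best is None or len(base) > len(best)):
--             best = base
--     if best is None:
--         return s.replace("_", " ").strip().title()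
--     if s == best:
--         return FRIENDLY_NAMES[best]
--     rest = s[len(best) + 1:]
--     return f"{FRIENDLY_NAMES[best]}: {rest.replace('_', ' ').title()}"
-- ===== Notes on version B (the rewrite author's own statement) =====
-- stated objective: simpler
-- what changed: A sorts the dict keys by length and scans them with early returns in three formatting branches; B drops the sort entirely, makes one pass over the unsorted dict keeping the longest matching key, and formats once at the end.
import Mathlib
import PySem

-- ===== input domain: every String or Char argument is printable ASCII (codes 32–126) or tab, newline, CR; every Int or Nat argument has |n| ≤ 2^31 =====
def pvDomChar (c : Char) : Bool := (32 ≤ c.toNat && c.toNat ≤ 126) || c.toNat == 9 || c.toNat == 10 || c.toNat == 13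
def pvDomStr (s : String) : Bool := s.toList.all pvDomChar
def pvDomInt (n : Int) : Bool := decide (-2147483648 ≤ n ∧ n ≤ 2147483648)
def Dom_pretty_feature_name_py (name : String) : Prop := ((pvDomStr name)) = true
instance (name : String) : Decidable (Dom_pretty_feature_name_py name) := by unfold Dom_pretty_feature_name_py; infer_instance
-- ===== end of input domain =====

-- B replaces A's sort-the-keys-by-length-then-scan with a single unsorted pass that keeps the
-- longest matching key, then formats once at the end (objective: simpler/alternative).

-- FRIENDLY_NAMES (module constant, shared by both programs)
def pvFriendly : PySem.Dict String String := PySem.Dict.ofList [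
  ("age", "Current age"),
  ("age_of_onset", "Age at seizure onset"),
  ("duration_since_onset", "Duration since onset"),
  ("pretreatment_seizure_count", "Pre-treatment seizure count"),
  ("seizure_burden_log", "Overall seizure burden (log)"),
  ("seizure_frequency_risk", "Seizure frequency relative to age"),
  ("prior_asm_exposure_count", "Number of prior ASMs tried"),
  ("high_prior_asm", "More than one prior ASM"),
  ("poly_asm_history", "Three or more prior ASMs"),
  ("structural_lesion_flag", "Structural lesion on MRI"),
  ("mri_lesion_type", "MRI lesion type"),
  ("eeg_epileptic_flag", "Epileptiform EEG activity"),
  ("eeg_status_detail", "EEG status"),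
  ("comorbidity_burden", "Comorbidity burden"),
  ("clinical_risk_index", "Clinical risk index (engineered)"),
  ("sex", "Biological sex"),
  ("seizure_type", "Seizure type"),
  ("current_asm", "Current ASM")]

-- str.title() for the ASCII domain: a letter is uppercased after a non-letter, lowercased after a
-- letter (hand port, exact on printable ASCII where 'cased' = 'alphabetic'; used by both Pythons)
def pvTitleChars : List Char → Bool → List Char
  | [], _ => []
  | c :: cs, prevAlpha =>
    (if PySem.Chars.isalpha c then
        (if prevAlpha then PySem.Chars.lowerChar c else PySem.Chars.upperChar c)
      else c) :: pvTitleChars cs (PySem.Chars.isalpha c)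

def pvTitle (s : String) : String := String.ofList (pvTitleChars s.toList false)

-- the identical prefix-stripping loop both Pythons begin with
def pvStripPrefixes (name : String) : String :=
  ["num__", "cat__", "remainder__"].foldl
    (fun s p => if PySem.Str.startswith s p then PySem.Str.slice s (some (PySem.Str.len p)) none else s)
    name

-- ===== PORT A =====
-- A's scan over the keys sorted by length (reverse): first exact or prefix match wins
def pvScanA (s : String) : List String → String
  | [] => pvTitle (PySem.Str.strip (PySem.Str.replace s "_" " "))
  | base :: rest =>
    if s == base then pvFriendly.getD base base
    else if PySem.Str.startswith s (base ++ "_") then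
      (pvFriendly.getD base (pvTitle (PySem.Str.replace base "_" " "))) ++ ": " ++
        pvTitle (PySem.Str.replace (PySem.Str.slice s (some (PySem.Str.len base + 1)) none) "_" " ")
    else pvScanA s rest

def pretty_feature_name_py (name : String) : String :=
  let s := pvStripPrefixes name
  pvScanA s (PySem.List.sorted pvFriendly.keys (fun k => PySem.Str.len k) true)

-- ===== PORT B =====
-- B's accumulator step: keep the longest key matching s (exactly the loop body in Source B)
def pvBestStep (s : String) (acc : Option String) (base : String) : Option String :=
  if (s == base || PySem.Str.startswith s (base ++ "_")) &&
      (match acc with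
       | none => true
       | some b => decide (PySem.Str.len b < PySem.Str.len base)) then some base
  else acc

def pretty_feature_name_py_alt (name : String) : String :=
  let s := pvStripPrefixes name
  let best := pvFriendly.keys.foldl (pvBestStep s) none
  match best with
  | none => pvTitle (PySem.Str.strip (PySem.Str.replace s "_" " "))
  | some b =>
    -- b is always a key of the dict, so the "" default of the FRIENDLY_NAMES[b] lookup is unreachable
    if s == b then (pvFriendly.get? b).getD ""
    else ((pvFriendly.get? b).getD "") ++ ": " ++
      pvTitle (PySem.Str.replace (PySem.Str.slice s (some (PySem.Str.len b + 1)) none) "_" " ")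

-- ===== PRECONDITION & SPEC =====
def Spec_pretty_feature_name_py (name : String) (out : String) : Prop := out = pretty_feature_name_py_alt name
instance (name : String) (out : String) : Decidable (Spec_pretty_feature_name_py name out) := by unfold Spec_pretty_feature_name_py; infer_instance

-- ===== CLAIM (what is proved, stated in full; the proofs are below) =====
def Claim_equal_pretty_feature_name_py : Prop := ∀ (name : String), Dom_pretty_feature_name_py name → Spec_pretty_feature_name_py name (pretty_feature_name_py name)

-- ===== LEMMAS AND PROOFS =====

-- 'base matches s' : s == base or s.startswith(base + "_")
def pvMatch (s base : String) : Bool := s == base || PySem.Str.startswith s (base ++ "_")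

-- the common shape of both programs' results, as a function of the chosen key (if any)
def pvRender (s : String) : Option String → String
  | none => pvTitle (PySem.Str.strip (PySem.Str.replace s "_" " "))
  | some base =>
    if s == base then pvFriendly.getD base base
    else (pvFriendly.getD base (pvTitle (PySem.Str.replace base "_" " "))) ++ ": " ++
      pvTitle (PySem.Str.replace (PySem.Str.slice s (some (PySem.Str.len base + 1)) none) "_" " ")

lemma pvBestStep_none (s a : String) :
    pvBestStep s none a = if pvMatch s a = true then some a else none := by
  show (if (pvMatch s a && true) = true then some a else none) = _
  rw [Bool.and_true]

lemma pvBestStep_some (s b a : String) :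
    pvBestStep s (some b) a =
      if (pvMatch s a && decide (PySem.Str.len b < PySem.Str.len a)) = true then some a
      else some b := rfl

lemma pvScanA_eq_render (s : String) (l : List String) :
    pvScanA s l = pvRender s (l.find? (pvMatch s)) := by
  induction l with
  | nil => rfl
  | cons base rest ih =>
    cases h1 : (s == base) with
    | true =>
      have hm : pvMatch s base = true := by simp [pvMatch, h1]
      rw [List.find?_cons_of_pos hm]
      simp only [pvScanA, pvRender]
      rw [h1]
      rfl
    | false =>
      cases h2 : PySem.Str.startswith s (base ++ "_") with
      | true =>
        have h2' : PySem.Chars.startswith s.toList (base.toList ++ ['_']) = true := by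
          simpa using h2
        have hm : pvMatch s base = true := by simp [pvMatch]; exact Or.inr h2'
        rw [List.find?_cons_of_pos hm]
        simp only [pvScanA, pvRender]
        rw [h1, h2]
        rfl
      | false =>
        have hm : pvMatch s base = false := by simp [pvMatch, h1]; simpa using h2
        rw [List.find?_cons_of_neg (by simp [hm])]
        simp only [pvScanA]
        rw [h1, h2]
        exact ih

-- once the accumulator is some b, it stays some, and its length never decreases
lemma pvFold_some_mono (s : String) (l : List String) :
    ∀ (b : String), ∃ k, l.foldl (pvBestStep s) (some b) = some k ∧
      PySem.Str.len b ≤ PySem.Str.len k := by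
  induction l with
  | nil => exact fun b => ⟨b, rfl, le_refl _⟩
  | cons a l ih =>
    intro b
    rw [List.foldl_cons, pvBestStep_some]
    by_cases h : (pvMatch s a && decide (PySem.Str.len b < PySem.Str.len a)) = true
    · rw [if_pos h]
      obtain ⟨k, hk, hle⟩ := ih a
      exact ⟨k, hk, le_trans (le_of_lt (of_decide_eq_true (Bool.and_eq_true_iff.mp h).2)) hle⟩
    · rw [if_neg h]; exact ih b

lemma pvFold_none_iff (s : String) (l : List String) :
    l.foldl (pvBestStep s) none = none ↔ ∀ k ∈ l, pvMatch s k = false := by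
  induction l with
  | nil => simp
  | cons a l ih =>
    rw [List.foldl_cons, pvBestStep_none]
    cases hm : pvMatch s a with
    | false =>
      rw [if_neg Bool.false_ne_true, ih]
      constructor
      · rintro h k hk
        rcases List.mem_cons.mp hk with rfl | hk'
        · exact hm
        · exact h k hk'
      · intro h k hk; exact h k (List.mem_cons_of_mem _ hk)
    | true =>
      rw [if_pos rfl]
      obtain ⟨k, hk, -⟩ := pvFold_some_mono s l a
      rw [hk]
      constructor
      · intro h; exact absurd h (Option.some_ne_none k)
      · intro h
        rw [h a List.mem_cons_self] at hm
        exact absurd hm Bool.false_ne_true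

lemma pvFold_mem (s : String) (l : List String) :
    ∀ (acc : Option String) (k : String), l.foldl (pvBestStep s) acc = some k →
      (k ∈ l ∧ pvMatch s k = true) ∨ acc = some k := by
  induction l with
  | nil => exact fun acc k h => Or.inr h
  | cons a l ih =>
    intro acc k h
    rw [List.foldl_cons] at h
    rcases ih _ k h with ⟨hk, hmk⟩ | hacc
    · exact Or.inl ⟨List.mem_cons_of_mem _ hk, hmk⟩
    · cases acc with
      | none =>
        rw [pvBestStep_none] at hacc
        by_cases hm : pvMatch s a = true
        · rw [if_pos hm] at hacc
          injection hacc with he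
          subst he
          exact Or.inl ⟨List.mem_cons_self, hm⟩
        · rw [if_neg hm] at hacc
          exact absurd hacc (by simp)
      | some b =>
        rw [pvBestStep_some] at hacc
        by_cases hc : (pvMatch s a && decide (PySem.Str.len b < PySem.Str.len a)) = true
        · rw [if_pos hc] at hacc
          injection hacc with he
          subst he
          exact Or.inl ⟨List.mem_cons_self, (Bool.and_eq_true_iff.mp hc).1⟩
        · rw [if_neg hc] at hacc
          exact Or.inr hacc

lemma pvFold_bound (s : String) (l : List String) :
    ∀ (acc : Option String) (k' k : String), k' ∈ l → pvMatch s k' = true →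
      l.foldl (pvBestStep s) acc = some k → PySem.Str.len k' ≤ PySem.Str.len k := by
  induction l with
  | nil => intro _ _ _ h; exact absurd h List.not_mem_nil
  | cons a l ih =>
    intro acc k' k hk' hm hfold
    rw [List.foldl_cons] at hfold
    rcases List.mem_cons.mp hk' with rfl | htail
    · -- the head k' is processed first: the new accumulator is at least as long as k'
      have hstep : ∃ c, pvBestStep s acc k' = some c ∧ PySem.Str.len k' ≤ PySem.Str.len c := by
        cases acc with
        | none => exact ⟨k', by rw [pvBestStep_none, if_pos hm], le_refl _⟩
        | some b =>
          by_cases hlt : PySem.Str.len b < PySem.Str.len k'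
          · exact ⟨k', by
              rw [pvBestStep_some, if_pos (Bool.and_eq_true_iff.mpr ⟨hm, decide_eq_true hlt⟩)],
              le_refl _⟩
          · exact ⟨b, by
              rw [pvBestStep_some,
                if_neg (fun hc => hlt (of_decide_eq_true (Bool.and_eq_true_iff.mp hc).2))],
              not_lt.mp hlt⟩
      obtain ⟨c, hc, hlen⟩ := hstep
      rw [hc] at hfold
      obtain ⟨k2, hk2, hle2⟩ := pvFold_some_mono s l c
      rw [hk2] at hfold
      injection hfold with he
      subst he
      exact le_trans hlen hle2
    · exact ih _ k' k htail hm hfold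

lemma pvMatch_take (s a : String) (h : pvMatch s a = true) :
    a.toList = s.toList.take a.toList.length := by
  rcases Bool.or_eq_true_iff.mp h with hb | hp
  · obtain rfl : s = a := eq_of_beq hb
    simp
  · rw [PySem.Str.startswith_eq] at hp
    have hinf : (a ++ "_").toList <+: s.toList := (PySem.Chars.startswith_iff _ _).mp hp
    have hpre : a.toList <+: s.toList := by
      refine List.IsPrefix.trans ?_ hinf
      rw [String.toList_append]
      exact List.prefix_append _ _
    exact List.prefix_iff_eq_take.mp hpre

lemma pvMatch_uniq (s a b : String) (ha : pvMatch s a = true) (hb : pvMatch s b = true)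
    (hlen : PySem.Str.len a = PySem.Str.len b) : a = b := by
  have hl : a.toList.length = b.toList.length := by
    simpa [PySem.Str.len] using hlen
  apply String.toList_inj.mp
  rw [pvMatch_take s a ha, pvMatch_take s b hb, hl]

-- every key of the dict really is a key: the lookups in both formatting branches agree
lemma pvKey_lookup (b : String) (hb : b ∈ pvFriendly.keys) :
    ∃ v, pvFriendly.get? b = some v := by
  have h : ∀ x ∈ pvFriendly.keys, (pvFriendly.get? x).isSome = true := by decide
  exact Option.isSome_iff_exists.mp (h b hb)

-- the heart of the equivalence: A's scan of the sorted keys = B's longest-match fold, rendered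
lemma pvMain (s : String) :
    pvScanA s (PySem.List.sorted pvFriendly.keys (fun k => PySem.Str.len k) true) =
      (match pvFriendly.keys.foldl (pvBestStep s) none with
       | none => pvTitle (PySem.Str.strip (PySem.Str.replace s "_" " "))
       | some b =>
         if s == b then (pvFriendly.get? b).getD ""
         else ((pvFriendly.get? b).getD "") ++ ": " ++
           pvTitle (PySem.Str.replace (PySem.Str.slice s (some (PySem.Str.len b + 1)) none) "_" " ")) := by
  rw [pvScanA_eq_render]
  cases hf : (PySem.List.sorted pvFriendly.keys (fun k => PySem.Str.len k) true).find? (pvMatch s) with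
  | none =>
    have hall : ∀ k ∈ pvFriendly.keys, pvMatch s k = false := by
      intro k hk
      have hkL : k ∈ PySem.List.sorted pvFriendly.keys (fun k => PySem.Str.len k) true :=
        (PySem.List.mem_sorted _ _ _ _).mpr hk
      simpa using List.find?_eq_none.mp hf k hkL
    rw [(pvFold_none_iff s pvFriendly.keys).mpr hall]
    rfl
  | some k0 =>
    obtain ⟨hpk0, as, bs, hdec, hpref⟩ := List.find?_eq_some_iff_append.mp hf
    have hk0L : k0 ∈ PySem.List.sorted pvFriendly.keys (fun k => PySem.Str.len k) true := by
      rw [hdec]; exact List.mem_append_right _ List.mem_cons_self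
    have hk0keys : k0 ∈ pvFriendly.keys := (PySem.List.mem_sorted _ _ _ _).mp hk0L
    -- k0 has maximal length among the matching keys
    have hmax : ∀ k' ∈ pvFriendly.keys, pvMatch s k' = true →
        PySem.Str.len k' ≤ PySem.Str.len k0 := by
      intro k' hk' hm
      have hk'L : k' ∈ PySem.List.sorted pvFriendly.keys (fun k => PySem.Str.len k) true :=
        (PySem.List.mem_sorted _ _ _ _).mpr hk'
      rw [hdec] at hk'L
      rcases List.mem_append.mp hk'L with hA | hB
      · exact absurd hm (by simpa using hpref k' hA)
      · rcases List.mem_cons.mp hB with rfl | hB'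
        · exact le_refl _
        · have hpw := PySem.List.sorted_pairwise_rev pvFriendly.keys (fun k => PySem.Str.len k)
          rw [hdec] at hpw
          exact (List.pairwise_cons.mp (List.pairwise_append.mp hpw).2.1).1 k' hB'
    -- B's fold returns some k, and k must be k0
    cases hfold : pvFriendly.keys.foldl (pvBestStep s) none with
    | none =>
      exact absurd ((pvFold_none_iff s pvFriendly.keys).mp hfold k0 hk0keys) (by simp [hpk0])
    | some k =>
      rcases pvFold_mem s pvFriendly.keys none k hfold with ⟨hkkeys, hmk⟩ | hbad
      · have h1 : PySem.Str.len k0 ≤ PySem.Str.len k :=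
          pvFold_bound s pvFriendly.keys none k0 k hk0keys hpk0 hfold
        have h2 : PySem.Str.len k ≤ PySem.Str.len k0 := hmax k hkkeys hmk
        obtain rfl : k0 = k := pvMatch_uniq s k0 k hpk0 hmk (le_antisymm h1 h2)
        obtain ⟨v, hv⟩ := pvKey_lookup k0 hk0keys
        simp only [pvRender, PySem.Dict.getD, hv, Option.getD_some]
      · exact absurd hbad (by simp)

-- ===== VERDICT (by name: the statement is the Claim_ definition above) =====
set_option maxHeartbeats 1000000 in
theorem pretty_feature_name_py_spec : Claim_equal_pretty_feature_name_py := by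
  intro name _
  show pretty_feature_name_py name = pretty_feature_name_py_alt name
  unfold pretty_feature_name_py pretty_feature_name_py_alt
  exact pvMain (pvStripPrefixes name)
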